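-- pv_equiv track=rewrite | github.com/DLS5-Omics/multimolecule | multimolecule/io.py | _split_st_entries
-- ===== SOURCE A (Python) =====
-- from typing import Dict, Iterable, List, Mapping, Sequence
--
-- def _split_st_entries(lines: Sequence[str]) -> List[List[str]]:
--     entries: List[List[str]] = []
--     current: List[str] = []
--     for line in lines:
--         lowered = line.lower()
--         is_header = lowered.startswith("#id:") or lowered.startswith("#name:")
--         if current and is_header:
--             entries.append(current)
--             current = []
--         if current or is_header:
--             current.append(line)
--     if current:
--         entries.append(current)
--     return entries
-- ===== SOURCE B (Python) =====
-- from typing import List, Sequence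
--
--
-- def _split_st_entries(lines: Sequence[str]) -> List[List[str]]:
--     # Staged decomposition: first collect the header positions, then cut the
--     # input into slices between consecutive headers (last one runs to the end).
--     heads = [i for i, line in enumerate(lines)
--              if line.lower().startswith(("#id:", "#name:"))]
--     stops = heads[1:] + [len(lines)]
--     return [list(lines[a: b]) for a, b in zip(heads, stops)]
-- ===== Notes on version B (the rewrite author's own statement) =====
-- stated objective: alternative
-- what changed: Replaces the forward accumulate-and-flush loop by two staged passes: first collect the header indices, then build each entry as a slice between consecutive header positions (the last slice runs to the end).
import Mathlib
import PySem

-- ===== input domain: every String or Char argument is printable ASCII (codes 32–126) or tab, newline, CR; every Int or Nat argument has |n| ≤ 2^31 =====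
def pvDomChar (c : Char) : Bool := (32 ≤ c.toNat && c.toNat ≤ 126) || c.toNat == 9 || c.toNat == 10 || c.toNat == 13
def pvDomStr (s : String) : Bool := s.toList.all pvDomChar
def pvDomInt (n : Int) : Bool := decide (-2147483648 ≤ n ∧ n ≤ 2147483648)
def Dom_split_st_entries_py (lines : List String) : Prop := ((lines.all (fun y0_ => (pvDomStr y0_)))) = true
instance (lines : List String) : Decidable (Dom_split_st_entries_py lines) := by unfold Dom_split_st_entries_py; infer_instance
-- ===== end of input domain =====

-- B keeps O(n) cost but changes the decomposition: header indices first, then slices between them; return value proved identical on all inputs.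

-- ===== PORT A =====
-- `line.lower().startswith("#id:") or line.lower().startswith("#name:")`
def isHeaderA (line : String) : Bool :=
  let lowered := PySem.Str.lower line
  PySem.Str.startswith lowered "#id:" || PySem.Str.startswith lowered "#name:"

-- loop body of A: flush `current` into `entries` on a header, then append the line
def stepA (st : List (List String) × List String) (line : String) :
    List (List String) × List String :=
  let is_header := isHeaderA line
  let st := if !st.2.isEmpty && is_header then (st.1 ++ [st.2], ([] : List String)) else st
  if !st.2.isEmpty || is_header then (st.1, st.2 ++ [line]) else st

def split_st_entries_py (lines : List String) : List (List String) :=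
  let st := lines.foldl stepA ([], [])
  if !st.2.isEmpty then st.1 ++ [st.2] else st.1

-- ===== PORT B =====
-- `line.lower().startswith(("#id:", "#name:"))`
def isHeaderB (line : String) : Bool :=
  PySem.Str.startswith (PySem.Str.lower line) "#id:" ||
  PySem.Str.startswith (PySem.Str.lower line) "#name:"

-- `heads = [i for i, line in enumerate(lines) if …]`, `stops = heads[1:] + [len(lines)]`,
-- `[list(lines[a:b]) for a, b in zip(heads, stops)]`  (heads[1:] of a plain list = drop 1)
def split_st_entries_py_alt (lines : List String) : List (List String) :=
  let heads : List Int :=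
    (PySem.List.enumerate lines).filterMap
      (fun p => if isHeaderB p.2 then some p.1 else none)
  let stops : List Int := heads.drop 1 ++ [(lines.length : Int)]
  (heads.zip stops).map (fun p => PySem.List.slice lines (some p.1) (some p.2))

-- ===== PRECONDITION & SPEC =====
def Spec_split_st_entries_py (lines : List String) (out : List (List String)) : Prop := out = split_st_entries_py_alt lines
instance (lines : List String) (out : List (List String)) : Decidable (Spec_split_st_entries_py lines out) := by unfold Spec_split_st_entries_py; infer_instance

-- ===== CLAIM (what is proved, stated in full; the proofs are below) =====
def Claim_equal_split_st_entries_py : Prop := ∀ (lines : List String), Dom_split_st_entries_py lines → Spec_split_st_entries_py lines (split_st_entries_py lines)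

-- ===== LEMMAS AND PROOFS =====

-- reference recursion: the group currently open at the head, and the entries
def refCur : List String → List String
  | [] => []
  | l :: ls => if isHeaderA l then [] else l :: refCur ls

def refEnt : List String → List (List String)
  | [] => []
  | l :: ls => if isHeaderA l then (l :: refCur ls) :: refEnt ls else refEnt ls

-- A's post-loop flush, as a function (proof helper)
def finalizeA (st : List (List String) × List String) : List (List String) :=
  if !st.2.isEmpty then st.1 ++ [st.2] else st.1

-- header positions, as naturals
def hdIdx : List String → List Nat
  | [] => []
  | l :: ls => if isHeaderA l then 0 :: (hdIdx ls).map (· + 1) else (hdIdx ls).map (· + 1)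

theorem isHeaderB_eq (l : String) : isHeaderB l = isHeaderA l := rfl

theorem stepA_char (ls : List String) : ∀ (e : List (List String)) (c : List String),
    finalizeA (ls.foldl stepA (e, c)) =
      e ++ (if c.isEmpty then refEnt ls else (c ++ refCur ls) :: refEnt ls) := by
  induction ls with
  | nil =>
    intro e c
    cases c <;> simp [List.foldl, finalizeA, refEnt, refCur]
  | cons l ls ih =>
    intro e c
    rw [List.foldl_cons]
    by_cases h : isHeaderA l = true
    · cases c with
      | nil =>
        have hs : stepA (e, []) l = (e, [l]) := by simp [stepA, h]
        rw [hs, ih]; simp [refEnt, h]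
      | cons a c =>
        have hs : stepA (e, a :: c) l = (e ++ [a :: c], [l]) := by simp [stepA, h]
        rw [hs, ih]; simp [refEnt, refCur, h]
    · cases c with
      | nil =>
        have hs : stepA (e, []) l = (e, []) := by simp [stepA, h]
        rw [hs, ih]; simp [refEnt, h]
      | cons a c =>
        have hs : stepA (e, a :: c) l = (e, (a :: c) ++ [l]) := by simp [stepA, h]
        rw [hs, ih]; simp [refEnt, refCur, h]

-- heads, computed by B's first pass, are hdIdx shifted by the enumeration start
theorem filterMap_enumerate (ls : List String) : ∀ (s : Int),
    (PySem.List.enumerate ls s).filterMap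
        (fun p => if isHeaderB p.2 then some p.1 else none) =
      (hdIdx ls).map (fun n : Nat => s + (n : Int)) := by
  induction ls with
  | nil => intro s; simp [PySem.List.enumerate_nil, hdIdx]
  | cons l ls ih =>
    intro s
    rw [PySem.List.enumerate_cons, List.filterMap_cons, ih (s + 1)]
    by_cases h : isHeaderA l = true
    · simp only [isHeaderB_eq, h, if_true, hdIdx, List.map_cons, List.map_map,
        Nat.cast_zero, add_zero]
      congr 1
      apply List.map_congr_left
      intro n _
      simp only [Function.comp_apply]
      push_cast
      ring
    · simp only [isHeaderB_eq, h, Bool.false_eq_true, if_false, hdIdx, List.map_map]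
      apply List.map_congr_left
      intro n _
      simp only [Function.comp_apply]
      push_cast
      ring

-- shifting every bound by one and prepending a line leaves the slices unchanged
theorem slices_shift (ls : List String) (l : String) (A B : List Nat) :
    ((A.map (· + 1)).zip ((B.map (· + 1)) ++ [ls.length + 1])).map
        (fun p => ((l :: ls).drop p.1).take (p.2 - p.1)) =
      (A.zip (B ++ [ls.length])).map (fun p => (ls.drop p.1).take (p.2 - p.1)) := by
  rw [show (B.map (· + 1)) ++ [ls.length + 1] = (B ++ [ls.length]).map (· + 1) by simp,
    List.zip_map, List.map_map]
  apply List.map_congr_left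
  intro p _
  simp [Prod.map, Nat.add_sub_add_right]

-- the prefix of ls up to its first header is refCur ls
theorem take_headD (ls : List String) :
    ls.take ((hdIdx ls).headD ls.length) = refCur ls := by
  induction ls with
  | nil => simp [hdIdx, refCur]
  | cons l ls ih =>
    by_cases h : isHeaderA l = true
    · simp [hdIdx, refCur, h]
    · cases hh : hdIdx ls with
      | nil => simp [hdIdx, refCur, h, hh, ← ih, List.take_of_length_le]
      | cons j r => simp [hdIdx, refCur, h, hh, ← ih]

theorem refEnt_of_hdIdx_nil (ls : List String) (h : hdIdx ls = []) : refEnt ls = [] := by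
  induction ls with
  | nil => rfl
  | cons l ls ih =>
    by_cases hl : isHeaderA l = true
    · simp [hdIdx, hl] at h
    · simp [hdIdx, hl] at h
      simp [refEnt, hl, ih h]

-- core: slicing between consecutive header positions yields refEnt
theorem slices_eq_refEnt (ls : List String) :
    ((hdIdx ls).zip ((hdIdx ls).drop 1 ++ [ls.length])).map
        (fun p => (ls.drop p.1).take (p.2 - p.1)) = refEnt ls := by
  induction ls with
  | nil => simp [hdIdx, refEnt]
  | cons l ls ih =>
    by_cases h : isHeaderA l = true
    · cases hh : hdIdx ls with
      | nil =>
        have hc : refCur ls = ls := by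
          have h2 := take_headD ls; rw [hh] at h2
          simp only [List.headD_nil, List.take_of_length_le (le_refl ls.length)] at h2
          exact h2.symm
        simp [hdIdx, refEnt, h, hh, refEnt_of_hdIdx_nil ls hh, hc,
          List.take_of_length_le]
      | cons j r =>
        have hj : ls.take j = refCur ls := by
          have h2 := take_headD ls; rw [hh] at h2; simpa using h2
        have ih2 : ((j :: r).zip (r ++ [ls.length])).map
            (fun p => (ls.drop p.1).take (p.2 - p.1)) = refEnt ls := by
          have ih' := ih; rw [hh] at ih'; simpa using ih'
        have e1 : hdIdx (l :: ls) = 0 :: (j :: r).map (· + 1) := by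
          simp [hdIdx, h, hh]
        rw [e1]
        have e2 : ((0 : Nat) :: (j :: r).map (· + 1)).drop 1 ++ [(l :: ls).length] =
            (j + 1) :: (r.map (· + 1) ++ [ls.length + 1]) := by simp
        rw [e2, List.zip_cons_cons, List.map_cons,
          slices_shift ls l (j :: r) r, ih2]
        simp [refEnt, h, hj]
    · have e1 : hdIdx (l :: ls) = (hdIdx ls).map (· + 1) := by simp [hdIdx, h]
      have e2 : ((hdIdx ls).map (· + 1)).drop 1 ++ [(l :: ls).length] =
          ((hdIdx ls).drop 1).map (· + 1) ++ [ls.length + 1] := by simp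
      rw [e1, e2, slices_shift ls l (hdIdx ls) ((hdIdx ls).drop 1), ih]
      simp [refEnt, h]

-- ===== VERDICT (by name: the statement is the Claim_ definition above) =====
theorem split_st_entries_py_spec : Claim_equal_split_st_entries_py := by
  intro lines _
  show split_st_entries_py lines = split_st_entries_py_alt lines
  have hA : split_st_entries_py lines = refEnt lines := by
    have h := stepA_char lines [] []
    simpa [split_st_entries_py, finalizeA] using h
  have hB : split_st_entries_py_alt lines = refEnt lines := by
    unfold split_st_entries_py_alt
    rw [show PySem.List.enumerate lines = PySem.List.enumerate lines 0 from rfl,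
      filterMap_enumerate lines 0]
    simp only [zero_add]
    rw [show ((hdIdx lines).map (fun n : Nat => (n : Int))).drop 1 ++ [(lines.length : Int)] =
        ((hdIdx lines).drop 1 ++ [lines.length]).map (fun n : Nat => (n : Int)) by
      simp]
    rw [List.zip_map, List.map_map]
    rw [show ((fun p => PySem.List.slice lines (some p.1) (some p.2)) ∘
        Prod.map (fun n : Nat => (n : Int)) (fun n : Nat => (n : Int))) =
        (fun p : Nat × Nat => (lines.drop p.1).take (p.2 - p.1)) from
      funext fun p => by simp [Prod.map, PySem.List.slice_natCast]]
    exact slices_eq_refEnt lines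
  rw [hA, hB]
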